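-- pv_equiv track=rewrite | github.com/Hakim47jumaev/exam4 | 6.py | sum_of_wowels
-- ===== SOURCE A (Python) =====
-- def sum_of_wowels(a):
--     sdict={
--         "A":4,
--         "E":3,
--         "I":1,
--         "O":0,
--         "u":0
--     }
--     cnt=0
--     for i in a :
--         for j in sdict:
--             if i.upper() ==j:
--                 cnt+=sdict[i.upper()]
--
--
--     return cnt
-- ===== SOURCE B (Python) =====
-- def sum_of_wowels(a):
--     counts = {}
--     for ch in a:
--         u = ch.upper()
--         counts[u] = counts.get(u, 0) + 1
--     return 4 * counts.get('A', 0) + 3 * counts.get('E', 0) + counts.get('I', 0)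
-- ===== Notes on version B (the rewrite author's own statement) =====
-- stated objective: simpler
-- what changed: B replaces A's inner scan over the weight dict for every character by a single frequency-tally pass over the uppercased characters followed by one fixed weighted sum of the three scoring vowel counts (weights 4, 3, 1).
import Mathlib
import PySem

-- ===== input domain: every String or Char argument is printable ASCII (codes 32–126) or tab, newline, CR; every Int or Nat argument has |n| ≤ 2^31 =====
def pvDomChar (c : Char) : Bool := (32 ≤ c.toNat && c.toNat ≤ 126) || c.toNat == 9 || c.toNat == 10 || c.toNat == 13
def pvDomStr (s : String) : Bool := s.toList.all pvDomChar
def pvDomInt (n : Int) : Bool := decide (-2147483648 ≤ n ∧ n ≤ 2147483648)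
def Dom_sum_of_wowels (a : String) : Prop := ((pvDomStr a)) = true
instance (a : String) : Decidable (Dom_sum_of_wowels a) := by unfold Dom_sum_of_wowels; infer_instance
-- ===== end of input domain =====

-- B replaces A's per-character scan over the weight dict by one tally pass and a
-- closed weighted sum of the three vowel counts (objective: simpler).

-- ===== PORT A =====
-- A's dict of weights; keys are the 1-char strings "A","E","I","O","u", modelled as Char.
def pvSdict : PySem.Dict Char Int :=
  PySem.Dict.ofList [('A', 4), ('E', 3), ('I', 1), ('O', 0), ('u', 0)]

def sum_of_wowels (a : String) : Int :=
  a.toList.foldl (fun cnt i =>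
    pvSdict.keys.foldl (fun cnt j =>
      if PySem.Chars.upperChar i = j then cnt + pvSdict.getD (PySem.Chars.upperChar i) 0
      else cnt) cnt) 0

-- ===== PORT B =====
def sum_of_wowels_alt (a : String) : Int :=
  let counts : PySem.Dict Char Int :=
    a.toList.foldl (fun d ch => d.modify (PySem.Chars.upperChar ch) 0 (· + 1)) PySem.Dict.empty
  4 * counts.getD 'A' 0 + 3 * counts.getD 'E' 0 + counts.getD 'I' 0

-- ===== PRECONDITION & SPEC =====
def Spec_sum_of_wowels (a : String) (out : Int) : Prop := out = sum_of_wowels_alt a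
instance (a : String) (out : Int) : Decidable (Spec_sum_of_wowels a out) := by unfold Spec_sum_of_wowels; infer_instance

-- ===== CLAIM (what is proved, stated in full; the proofs are below) =====
def Claim_equal_sum_of_wowels : Prop := ∀ (a : String), Dom_sum_of_wowels a → Spec_sum_of_wowels a (sum_of_wowels a)

-- ===== LEMMAS AND PROOFS =====

-- A's loop accumulates, from any start value, the weighted counts of the uppercased chars.
theorem pv_afold (cs : List Char) (cnt : Int) :
    cs.foldl (fun cnt i =>
      pvSdict.keys.foldl (fun cnt j =>
        if PySem.Chars.upperChar i = j then cnt + pvSdict.getD (PySem.Chars.upperChar i) 0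
        else cnt) cnt) cnt
    = cnt + 4 * ((cs.map PySem.Chars.upperChar).count 'A' : Int)
          + 3 * ((cs.map PySem.Chars.upperChar).count 'E' : Int)
          + ((cs.map PySem.Chars.upperChar).count 'I' : Int) := by
  have hk : pvSdict.keys = ['A', 'E', 'I', 'O', 'u'] := by decide
  have gA : pvSdict.getD 'A' 0 = 4 := by decide
  have gE : pvSdict.getD 'E' 0 = 3 := by decide
  have gI : pvSdict.getD 'I' 0 = 1 := by decide
  have gO : pvSdict.getD 'O' 0 = 0 := by decide
  have gu : pvSdict.getD 'u' 0 = 0 := by decide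
  induction cs generalizing cnt with
  | nil => simp
  | cons c cs ih =>
      simp only [List.foldl_cons, List.map_cons, List.count_cons, hk,
        List.foldl_nil]
      by_cases hA : PySem.Chars.upperChar c = 'A' <;>
      by_cases hE : PySem.Chars.upperChar c = 'E' <;>
      by_cases hI : PySem.Chars.upperChar c = 'I' <;>
      by_cases hO : PySem.Chars.upperChar c = 'O' <;>
      by_cases hu : PySem.Chars.upperChar c = 'u' <;>
        simp_all <;> ring

theorem sum_of_wowels_eq_alt (a : String) : sum_of_wowels a = sum_of_wowels_alt a := by
  unfold sum_of_wowels sum_of_wowels_alt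
  rw [pv_afold]
  have h : ∀ v : Char,
      (a.toList.foldl (fun d ch => PySem.Dict.modify d (PySem.Chars.upperChar ch) 0 (· + 1))
        PySem.Dict.empty).getD v 0
      = ((a.toList.map PySem.Chars.upperChar).count v : Int) := by
    intro v
    have h1 := PySem.Dict.getD_foldl_modify_add_one
      (l := a.toList.map PySem.Chars.upperChar) (d := (PySem.Dict.empty : PySem.Dict Char Int)) (v := v)
    rw [List.foldl_map] at h1
    simpa using h1
  simp only [h]
  ring

-- ===== VERDICT (by name: the statement is the Claim_ definition above) =====
theorem sum_of_wowels_spec : Claim_equal_sum_of_wowels := by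
  intro a _
  exact sum_of_wowels_eq_alt a
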